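-- pv_equiv track=rewrite | github.com/ericmerle3789/Collatz-Junction-Theorem | scripts/research/r32_spectral_census.py | compute_all_Z_dp
-- ===== SOURCE A (Python) =====
-- from math import comb, gcd, log2, ceil, log, sqrt
--
-- def compute_S(k):
--     """S = ceil(k * log2(3)), the unique integer with 2^S > 3^k and 2^{S-1} <= 3^k."""
--     S = ceil(k * log2(3))
--     while (1 << S) <= 3**k:
--         S += 1
--     while S > 0 and (1 << (S - 1)) > 3**k:
--         S -= 1
--     return S
--
-- def modinv(a, m):
--     if m == 1:
--         return 0
--     old_r, r = a % m, m
--     old_s, s = 1, 0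
--     while r != 0:
--         q = old_r // r
--         old_r, r = r, old_r - q * r
--         old_s, s = s, old_s - q * s
--     return old_s % m if old_r == 1 else None
--
-- def compute_g(p):
--     """g = 2 * 3^{-1} mod p."""
--     inv3 = modinv(3, p)
--     return (2 * inv3) % p if inv3 is not None else None
--
-- def compute_all_Z_dp(k, p):
--     """
--     Compute Z(a) for ALL residues a = 0..p-1.
--     Returns dict {a: count} and C_total.
--     """
--     S = compute_S(k)
--     max_B = S - k
--     g = compute_g(p)
--     if g is None:
--         return None, None
--
--     g_powers = [pow(g, j, p) for j in range(k)]
--     two_powers = [pow(2, b, p) for b in range(max_B + 1)]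
--
--     dp = [[0] * (max_B + 1) for _ in range(p)]
--     for b in range(max_B + 1):
--         r = (g_powers[0] * two_powers[b]) % p
--         dp[r][b] += 1
--
--     for j in range(1, k):
--         new_dp = [[0] * (max_B + 1) for _ in range(p)]
--         coeff = g_powers[j]
--         for r in range(p):
--             for b_prev in range(max_B + 1):
--                 if dp[r][b_prev] == 0:
--                     continue
--                 cnt = dp[r][b_prev]
--                 if j == k - 1:
--                     b_new = max_B
--                     if b_new >= b_prev:
--                         r_new = (r + coeff * two_powers[b_new]) % p
--                         new_dp[r_new][b_new] += cnt
--                 else: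
--                     for b_new in range(b_prev, max_B + 1):
--                         r_new = (r + coeff * two_powers[b_new]) % p
--                         new_dp[r_new][b_new] += cnt
--         dp = new_dp
--
--     Z_dict = {}
--     C_total = 0
--     for a in range(p):
--         count = sum(dp[a][b] for b in range(max_B + 1))
--         if count > 0:
--             Z_dict[a] = count
--         C_total += count
--     return Z_dict, C_total
-- ===== SOURCE B (Python) =====
-- from math import ceil, log2
--
-- def compute_S(k):
--     """S = ceil(k * log2(3)), the unique integer with 2^S > 3^k and 2^{S-1} <= 3^k."""
--     S = ceil(k * log2(3))
--     while (1 << S) <= 3**k: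
--         S += 1
--     while S > 0 and (1 << (S - 1)) > 3**k:
--         S -= 1
--     return S
--
-- def modinv(a, m):
--     if m == 1:
--         return 0
--     old_r, r = a % m, m
--     old_s, s = 1, 0
--     while r != 0:
--         q = old_r // r
--         old_r, r = r, old_r - q * r
--         old_s, s = s, old_s - q * s
--     return old_s % m if old_r == 1 else None
--
-- def compute_g(p):
--     """g = 2 * 3^{-1} mod p."""
--     inv3 = modinv(3, p)
--     return (2 * inv3) % p if inv3 is not None else None
--
-- def compute_all_Z_dp(k, p):
--     """Same result as A, computed on the transposed table: one residue VECTOR per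
--     cap value b (cols[b][r] instead of dp[r][b]).  Each middle step keeps one
--     running prefix vector acc over b and emits its rotation by coeff*2^b mod p
--     in place of A's per-cell inner b_new scatter loop; the last step rotates the
--     single column-sum vector.  Vector ops are whole-list operations (zip/slicing)."""
--     S = compute_S(k)
--     max_B = S - k
--     g = compute_g(p)
--     if g is None:
--         return None, None
--
--     cols = []
--     pw = 1 % p
--     for _ in range(max_B + 1):
--         col = [0] * p
--         col[pw] = 1
--         cols.append(col)
--         pw = 2 * pw % p
--
--     coeff = 1 % p
--     for j in range(1, k):
--         coeff = coeff * g % p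
--         if j == k - 1:
--             total = [0] * p
--             for col in cols:
--                 total = [t + c for t, c in zip(total, col)]
--             s = coeff * pow(2, max_B, p) % p
--             cols = [[0] * p] * max_B + [total[p - s:] + total[:p - s]]
--         else:
--             new_cols = []
--             acc = [0] * p
--             pw = 1 % p
--             for col in cols:
--                 acc = [a + c for a, c in zip(acc, col)]
--                 s = coeff * pw % p
--                 new_cols.append(acc[p - s:] + acc[:p - s])
--                 pw = 2 * pw % p
--             cols = new_cols
--
--     Z_dict = {}
--     C_total = 0
--     for a in range(p):
--         cnt = sum(col[a] for col in cols)
--         if cnt > 0: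
--             Z_dict[a] = cnt
--         C_total += cnt
--     return Z_dict, C_total
-- ===== Notes on version B (the rewrite author's own statement) =====
-- stated objective: alternative
-- what changed: B runs the DP on the transposed table (one residue vector per cap value b), keeping a running prefix vector over b and emitting whole-vector cyclic rotations (list slicing) per column in place of A's per-cell inner b_new scatter loop.
import Mathlib
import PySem

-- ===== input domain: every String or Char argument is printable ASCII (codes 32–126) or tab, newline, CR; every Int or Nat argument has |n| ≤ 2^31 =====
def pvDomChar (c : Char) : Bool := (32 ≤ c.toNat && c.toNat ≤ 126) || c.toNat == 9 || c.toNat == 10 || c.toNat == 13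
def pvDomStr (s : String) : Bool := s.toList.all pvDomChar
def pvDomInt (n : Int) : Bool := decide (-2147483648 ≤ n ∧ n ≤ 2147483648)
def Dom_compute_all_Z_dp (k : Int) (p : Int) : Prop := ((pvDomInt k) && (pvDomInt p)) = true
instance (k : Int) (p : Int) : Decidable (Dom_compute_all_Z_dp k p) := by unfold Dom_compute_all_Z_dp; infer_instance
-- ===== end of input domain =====

-- B runs the DP on the transposed table (one residue VECTOR per cap value b) with a
-- running prefix vector and whole-vector rotations in place of A's per-cell inner
-- b_new scatter loop; same value on every admitted input (objective: alternative).

-- ===== PORT A =====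
-- shared helpers (identical code in Source A and Source B)

-- compute_S: A seeds S with the float ceil(k*log2(3)) and then corrects it with two loops
-- until 2^(S-1) <= 3^k < 2^S; the result is that unique S, independent of the seed.
-- Ported exactly as that unique value (floats are not portable; k < 0 raises in Python,
-- outside Pre_).
def compute_S (k : Int) : Int := ((3 ^ k.toNat : Nat).log2 : Int) + 1

-- the extended-Euclid loop of modinv; fuel = |m| + 1 bounds the iteration count
-- (|r| strictly decreases each round), so fuel is never exhausted for m ≠ 0.
def modinvLoop (fuel : Nat) (old_r r old_s s m : Int) : Option Int :=
  match fuel with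
  | 0 => none
  | fuel + 1 =>
    if r = 0 then (if old_r = 1 then some (PySem.Int.mod old_s m) else none)
    else
      let q := PySem.Int.floordiv old_r r
      modinvLoop fuel r (old_r - q * r) s (old_s - q * s) m

def modinv (a m : Int) : Option Int :=
  if m = 1 then some 0
  else modinvLoop (m.natAbs + 1) (PySem.Int.mod a m) m 1 0 m

def compute_g (p : Int) : Option Int :=
  match modinv 3 p with
  | none => none
  | some inv3 => some (PySem.Int.mod (2 * inv3) p)

-- A-side helpers

-- xs[i]; every index used under Pre_ is in range, so the default is never taken
def geti (xs : List Int) (i : Int) : Int := PySem.List.pyGetD xs i 0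

-- 'dp = [[0] * (max_B + 1) for _ in range(p)]'
def zerosT (p max_B : Int) : List (List Int) :=
  (PySem.List.pyRange 0 p 1).map (fun _ => PySem.List.pyRepeat [(0 : Int)] (max_B + 1))

-- 'dp[r][b]' (every index the algorithm produces is in range, so the default is never taken)
def lookupA (tbl : List (List Int)) (x : Int × Int) : Int :=
  PySem.List.pyGetD (PySem.List.pyGetD tbl x.1 []) x.2 0

-- 'arr[r][b] += v' on a 2-d array
def bumpT (tbl : List (List Int)) (key : Int × Int) (v : Int) : List (List Int) :=
  PySem.List.pySetD tbl key.1
    (PySem.List.pySetD (PySem.List.pyGetD tbl key.1 []) key.2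
      (PySem.List.pyGetD (PySem.List.pyGetD tbl key.1 []) key.2 0 + v))

-- A's initial loop 'dp[(g_powers[0]*two_powers[b]) % p][b] += 1'
def initDP (p max_B : Int) (g_powers two_powers : List Int) : List (List Int) :=
  (PySem.List.pyRange 0 (max_B + 1) 1).foldl
    (fun dp b => bumpT dp (PySem.Int.mod (geti g_powers 0 * geti two_powers b) p, b) 1)
    (zerosT p max_B)

-- A's final readout loop building (Z_dict, C_total)
def readout (p max_B : Int) (dp : List (List Int)) : (Option (List (Int × Int))) × Option Int :=
  let fin := (PySem.List.pyRange 0 p 1).foldl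
    (fun (acc : PySem.Dict Int Int × Int) a =>
      let count := ((PySem.List.pyRange 0 (max_B + 1) 1).map (fun b => lookupA dp (a, b))).sum
      ((if 0 < count then acc.1.insert a count else acc.1), acc.2 + count))
    ((PySem.Dict.empty : PySem.Dict Int Int), 0)
  (some fin.1.items, some fin.2)

-- A's body of 'for j in range(1, k)': scatter every dp[r][b_prev] to all b_new ≥ b_prev
def stepA (p max_B k : Int) (tw : List Int) (coeff j : Int) (dp : List (List Int)) :
    List (List Int) :=
  (PySem.List.pyRange 0 p 1).foldl
    (fun nd r =>
      (PySem.List.pyRange 0 (max_B + 1) 1).foldl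
        (fun nd b_prev =>
          if lookupA dp (r, b_prev) = 0 then nd
          else
            if j = k - 1 then
              if max_B ≥ b_prev then
                bumpT nd (PySem.Int.mod (r + coeff * geti tw max_B) p, max_B)
                  (lookupA dp (r, b_prev))
              else nd
            else
              (PySem.List.pyRange b_prev (max_B + 1) 1).foldl
                (fun nd b_new =>
                  bumpT nd (PySem.Int.mod (r + coeff * geti tw b_new) p, b_new)
                    (lookupA dp (r, b_prev)))
                nd)
        nd)
    (zerosT p max_B)

def compute_all_Z_dp (k : Int) (p : Int) : (Option (List (Int × Int))) × Option Int :=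
  let S := compute_S k
  let max_B := S - k
  match compute_g p with
  | none => (none, none)
  | some g =>
    let g_powers := (PySem.List.pyRange 0 k 1).map (fun j => PySem.Int.powMod g j.toNat p)
    let two_powers := (PySem.List.pyRange 0 (max_B + 1) 1).map (fun b => PySem.Int.powMod 2 b.toNat p)
    let dp0 := initDP p max_B g_powers two_powers
    let dpF := (PySem.List.pyRange 1 k 1).foldl
      (fun dp j => stepA p max_B k two_powers (geti g_powers j) j dp) dp0
    readout p max_B dpF

-- ===== PORT B =====
-- B keeps one residue VECTOR per cap value b (transposed layout cols[b][r]).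

-- '[0] * p'
def zerosRow (p : Int) : List Int := PySem.List.pyRepeat [(0 : Int)] p

-- '[t + c for t, c in zip(xs, ys)]'
def vadd (xs ys : List Int) : List Int := (xs.zip ys).map (fun tc => tc.1 + tc.2)

-- 'xs[p - s:] + xs[:p - s]'  (cyclic shift of a length-p vector by s places)
def rot (p s : Int) (xs : List Int) : List Int :=
  PySem.List.slice xs (some (p - s)) none ++ PySem.List.slice xs none (some (p - s))

-- B's init loop: 'col = [0]*p; col[pw] = 1; cols.append(col); pw = 2 * pw % p'
def initColsB (p max_B : Int) : List (List Int) :=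
  ((PySem.List.pyRange 0 (max_B + 1) 1).foldl
    (fun (st : List (List Int) × Int) _ =>
      (st.1 ++ [PySem.List.pySetD (zerosRow p) st.2 1], PySem.Int.mod (2 * st.2) p))
    ([], PySem.Int.mod 1 p)).1

-- B's middle step: running prefix vector acc over b, emit its rotation per column
def stepMidB (p coeff : Int) (cols : List (List Int)) : List (List Int) :=
  (cols.foldl
    (fun (st : List (List Int) × List Int × Int) col =>
      let acc := vadd st.2.1 col
      (st.1 ++ [rot p (PySem.Int.mod (coeff * st.2.2) p) acc], acc,
       PySem.Int.mod (2 * st.2.2) p))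
    ([], zerosRow p, PySem.Int.mod 1 p)).1

-- B's last step: rotate the single column-sum vector into position b = max_B
def stepLastB (p max_B coeff : Int) (cols : List (List Int)) : List (List Int) :=
  let total := cols.foldl vadd (zerosRow p)
  PySem.List.pyRepeat [zerosRow p] max_B ++
    [rot p (PySem.Int.mod (coeff * PySem.Int.powMod 2 max_B.toNat p) p) total]

-- B's readout loop (reads the transposed table)
def readoutB (p : Int) (cols : List (List Int)) : (Option (List (Int × Int))) × Option Int :=
  let fin := (PySem.List.pyRange 0 p 1).foldl
    (fun (acc : PySem.Dict Int Int × Int) a =>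
      let cnt := (cols.map (fun col => PySem.List.pyGetD col a 0)).sum
      ((if 0 < cnt then acc.1.insert a cnt else acc.1), acc.2 + cnt))
    ((PySem.Dict.empty : PySem.Dict Int Int), 0)
  (some fin.1.items, some fin.2)

def compute_all_Z_dp_alt (k : Int) (p : Int) : (Option (List (Int × Int))) × Option Int :=
  let S := compute_S k
  let max_B := S - k
  match compute_g p with
  | none => (none, none)
  | some g =>
    let colsF := (PySem.List.pyRange 1 k 1).foldl
      (fun (st : List (List Int) × Int) j =>
        let coeff := PySem.Int.mod (st.2 * g) p
        ((if j = k - 1 then stepLastB p max_B coeff st.1 else stepMidB p coeff st.1), coeff))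
      (initColsB p max_B, PySem.Int.mod 1 p)
    readoutB p colsF.1

-- ===== PRECONDITION & SPEC =====
-- Pre_ = exactly where A returns: p = 0 raises ZeroDivisionError, k < 0 raises ValueError
-- (negative shift), and for k = 0 the IndexError g_powers[0] is reached unless compute_g
-- already returned None (p < 0 or 3 | p).
def Pre_compute_all_Z_dp (k : Int) (p : Int) : Prop :=
  p ≠ 0 ∧ (1 ≤ k ∨ (k = 0 ∧ (p < 0 ∨ PySem.Int.mod p 3 = 0)))
instance (k : Int) (p : Int) : Decidable (Pre_compute_all_Z_dp k p) := by
  unfold Pre_compute_all_Z_dp; infer_instance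

def pvWitness_compute_all_Z_dp : Int × Int := (2, 5)

def Spec_compute_all_Z_dp (k : Int) (p : Int) (out : (Option (List (Int × Int))) × Option Int) : Prop := out = compute_all_Z_dp_alt k p
instance (k : Int) (p : Int) (out : (Option (List (Int × Int))) × Option Int) : Decidable (Spec_compute_all_Z_dp k p out) := by unfold Spec_compute_all_Z_dp; infer_instance

-- ===== CLAIM (what is proved, stated in full; the proofs are below) =====
def Claim_equal_compute_all_Z_dp : Prop := ∀ (k : Int) (p : Int), Dom_compute_all_Z_dp k p → Pre_compute_all_Z_dp k p → Spec_compute_all_Z_dp k p (compute_all_Z_dp k p)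

-- ===== LEMMAS AND PROOFS =====

-- in-range cells and well-formed p×(max_B+1) tables (A-side invariants)
def InRt (p M : Int) (x : Int × Int) : Prop := 0 ≤ x.1 ∧ x.1 < p ∧ 0 ≤ x.2 ∧ x.2 ≤ M

def WFt (p M : Int) (tbl : List (List Int)) : Prop :=
  tbl.length = p.toNat ∧ ∀ row ∈ tbl, row.length = (M + 1).toNat

-- read B's transposed table at (r, b)
def Fc (cols : List (List Int)) (x : Int × Int) : Int :=
  PySem.List.pyGetD (PySem.List.pyGetD cols x.2 []) x.1 0

-- shape invariant of B's table
def OKc (p max_B : Int) (cols : List (List Int)) : Prop :=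
  cols.length = (max_B + 1).toNat ∧ ∀ c ∈ cols, c.length = p.toNat

-- closed recursive form of B's init loop
def iRec (p : Int) : Nat → Int → List (List Int)
  | 0, _ => []
  | n + 1, pw => PySem.List.pySetD (zerosRow p) pw 1 :: iRec p n (PySem.Int.mod (2 * pw) p)

-- closed recursive form of B's middle-step loop
def midRec (p coeff : Int) : List (List Int) → List Int → Int → List (List Int)
  | [], _, _ => []
  | col :: cs, acc, pw =>
    rot p (PySem.Int.mod (coeff * pw) p) (vadd acc col) ::
      midRec p coeff cs (vadd acc col) (PySem.Int.mod (2 * pw) p)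

-- ----- modular arithmetic -----

theorem mod_mul_mod_left (p a b : Int) (hp : 0 < p) :
    PySem.Int.mod (PySem.Int.mod a p * b) p = PySem.Int.mod (a * b) p := by
  simp only [PySem.Int.mod_eq_emod_of_pos hp]
  conv_rhs => rw [Int.mul_emod, ← Int.emod_emod_of_dvd a dvd_rfl, ← Int.mul_emod]

theorem mod_mul_mod_right (p a b : Int) (hp : 0 < p) :
    PySem.Int.mod (a * PySem.Int.mod b p) p = PySem.Int.mod (a * b) p := by
  rw [mul_comm a (PySem.Int.mod b p), mod_mul_mod_left p b a hp, mul_comm]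

theorem mod_sub_mul_mod (p a c x : Int) (hp : 0 < p) :
    PySem.Int.mod (a - c * PySem.Int.mod x p) p = PySem.Int.mod (a - c * x) p := by
  simp only [PySem.Int.mod_eq_emod_of_pos hp]
  rw [Int.sub_emod, Int.mul_emod, Int.emod_emod_of_dvd x dvd_rfl, ← Int.mul_emod,
    ← Int.sub_emod]

theorem mod_sub_mod (p a x : Int) (hp : 0 < p) :
    PySem.Int.mod (a - PySem.Int.mod x p) p = PySem.Int.mod (a - x) p := by
  have := mod_sub_mul_mod p a 1 x hp
  simpa using this

theorem mod_small (p a : Int) (h0 : 0 ≤ a) (h1 : a < p) : PySem.Int.mod a p = a := by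
  rw [PySem.Int.mod_eq_emod_of_pos (lt_of_le_of_lt h0 h1), Int.emod_eq_of_lt h0 h1]

theorem shift_unique (p r r' t : Int) (hp : 0 < p) (hr0 : 0 ≤ r) (hrp : r < p)
    (h0 : 0 ≤ r') (h1 : r' < p) :
    (r = PySem.Int.mod (r' + t) p) ↔ (r' = PySem.Int.mod (r - t) p) := by
  simp only [PySem.Int.mod_eq_emod_of_pos hp]
  constructor
  · intro h
    subst h
    have : ((r' + t) % p - t) % p = (r' + t - t) % p := by
      rw [Int.sub_emod, Int.emod_emod_of_dvd _ dvd_rfl, ← Int.sub_emod]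
    simpa [Int.emod_eq_of_lt h0 h1] using this.symm
  · intro h
    subst h
    have : ((r - t) % p + t) % p = (r - t + t) % p := by
      rw [Int.add_emod, Int.emod_emod_of_dvd _ dvd_rfl, ← Int.add_emod]
    simpa [Int.emod_eq_of_lt hr0 hrp] using this.symm

-- ----- sums with a unique selected index -----

theorem sum_pick (g : Int → Int) :
    ∀ (L : List Int), L.Pairwise (· < ·) → ∀ b : Int,
      (L.map (fun x => if b = x then g x else 0)).sum = if b ∈ L then g b else 0 := by
  intro L
  induction L with
  | nil => intro _ b; simp
  | cons a L ih =>
    intro hpw b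
    rw [List.pairwise_cons] at hpw
    simp only [List.map_cons, List.sum_cons]
    by_cases hba : b = a
    · subst hba
      have hzero : (L.map (fun x => if b = x then g x else 0)).sum = 0 := by
        have : ∀ x ∈ L, (if b = x then g x else 0) = 0 := by
          intro x hx
          have := hpw.1 x hx
          simp [show ¬ b = x by omega]
        rw [List.map_congr_left this]
        simp
      simp [hzero]
    · rw [if_neg hba, ih hpw.2 b]
      simp [List.mem_cons, hba]

theorem ite_sum_pull {α : Type} (c : Prop) [Decidable c] (L : List α) (f : α → Int) :
    ((L.map (fun a => if c then f a else 0)).sum) = if c then (L.map f).sum else 0 := by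
  split <;> simp

theorem prefix_split (M b : Int) (hb0 : 0 ≤ b) (hbM : b ≤ M) (f : Int → Int) :
    ((PySem.List.pyRange 0 (M + 1) 1).map (fun bp => if bp ≤ b then f bp else 0)).sum
      = ((PySem.List.pyRange 0 (b + 1) 1).map f).sum := by
  rw [PySem.List.pyRange_one_append 0 (b + 1) (M + 1) (by omega) (by omega),
    List.map_append, List.sum_append]
  have h1 : ((PySem.List.pyRange 0 (b + 1) 1).map (fun bp => if bp ≤ b then f bp else 0))
      = (PySem.List.pyRange 0 (b + 1) 1).map f := by
    apply List.map_congr_left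
    intro bp hbp
    have := (PySem.List.mem_pyRange_one).1 hbp
    simp [show bp ≤ b by omega]
  have h2 : ((PySem.List.pyRange (b + 1) (M + 1) 1).map (fun bp => if bp ≤ b then f bp else 0)).sum = 0 := by
    have : ∀ bp ∈ PySem.List.pyRange (b + 1) (M + 1) 1, (if bp ≤ b then f bp else 0) = 0 := by
      intro bp hbp
      have := (PySem.List.mem_pyRange_one).1 hbp
      simp [show ¬ bp ≤ b by omega]
    rw [List.map_congr_left this]
    simp
  rw [h1, h2, add_zero]

-- ----- generic additive-fold evaluation (for A's bumpT loops over tables) -----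

theorem zerosT_wf (p M : Int) : WFt p M (zerosT p M) := by
  constructor
  · unfold zerosT
    rw [List.length_map, PySem.List.length_pyRange_one]
    simp
  · intro row hrow
    unfold zerosT at hrow
    obtain ⟨_, _, h⟩ := List.mem_map.1 hrow
    rw [← h, PySem.List.pyRepeat_singleton]
    simp

theorem zerosT_get (p M : Int) (hp : 0 < p) (x : Int × Int) (hx : InRt p M x) :
    lookupA (zerosT p M) x = 0 := by
  obtain ⟨h1, h2, h3, h4⟩ := hx
  unfold lookupA zerosT
  rw [PySem.List.pyGetD_map_pyRange_of_nonneg _ _ _ _ h1 h2, PySem.List.pyRepeat_singleton,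
    PySem.List.pyGetD_eq_getElem _ _ h3 (by simp; omega)]
  simp

theorem bumpT_eval (p M : Int) (hp : 0 < p) (tbl : List (List Int)) (key : Int × Int) (v : Int)
    (hwf : WFt p M tbl) (hk : InRt p M key) :
    WFt p M (bumpT tbl key v) ∧ ∀ x, InRt p M x →
      lookupA (bumpT tbl key v) x = lookupA tbl x + (if x = key then v else 0) := by
  obtain ⟨hl, hr⟩ := hwf
  obtain ⟨hk1, hk2, hk3, hk4⟩ := hk
  have hrowmem : PySem.List.pyGetD tbl key.1 [] ∈ tbl := by
    rw [PySem.List.pyGetD_eq_getElem _ _ hk1 (by omega)]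
    exact List.getElem_mem _
  have hrowlen : (PySem.List.pyGetD tbl key.1 []).length = (M + 1).toNat := hr _ hrowmem
  constructor
  · unfold bumpT
    rw [PySem.List.pySetD_of_nonneg _ _ hk1]
    constructor
    · simp [hl]
    · intro row hrow
      rcases List.mem_or_eq_of_mem_set hrow with h | h
      · exact hr _ h
      · rw [h, PySem.List.length_pySetD]
        exact hrowlen
  · intro x hx
    obtain ⟨hx1, hx2, hx3, hx4⟩ := hx
    unfold bumpT lookupA
    rw [PySem.List.pySetD_of_nonneg _ _ hk1,
      PySem.List.pyGetD_eq_getElem _ _ hx1 (by simp [hl]; omega),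
      List.getElem_set]
    by_cases h1 : key.1.toNat = x.1.toNat
    · rw [if_pos h1]
      have hx1k : x.1 = key.1 := by omega
      rw [PySem.List.pySetD_of_nonneg _ _ hk3,
        PySem.List.pyGetD_eq_getElem _ _ hx3 (by simp [hrowlen]; omega),
        List.getElem_set]
      by_cases h2 : key.2.toNat = x.2.toNat
      · have hx2k : x.2 = key.2 := by omega
        have hxk : x = key := Prod.ext hx1k hx2k
        rw [if_pos h2, if_pos hxk, hxk]
      · have hxk : ¬ x = key := by
          intro h
          rw [h] at h2
          exact h2 rfl
        rw [if_neg h2, if_neg hxk, add_zero, hx1k]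
        exact (PySem.List.pyGetD_eq_getElem _ _ hx3 (by simp [hrowlen]; omega)).symm
    · rw [if_neg h1]
      have hxk : ¬ x = key := by
        intro h
        rw [h] at h1
        exact h1 rfl
      rw [if_neg hxk, add_zero,
        PySem.List.pyGetD_eq_getElem tbl _ hx1 (by omega)]

theorem foldl_addT {α : Type} (p M : Int) (S : α → Int × Int → Int)
    (body : List (List Int) → α → List (List Int)) :
    ∀ (L : List α),
      (∀ tbl a, a ∈ L → WFt p M tbl →
        WFt p M (body tbl a) ∧ ∀ x, InRt p M x →
          lookupA (body tbl a) x = lookupA tbl x + S a x) →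
      ∀ tbl, WFt p M tbl →
        WFt p M (L.foldl body tbl) ∧ ∀ x, InRt p M x →
          lookupA (L.foldl body tbl) x = lookupA tbl x + (L.map (fun a => S a x)).sum := by
  intro L
  induction L with
  | nil => intro _ tbl hwf; exact ⟨hwf, fun x _ => by simp⟩
  | cons b L ih =>
    intro h tbl hwf
    have hb := h tbl b (List.mem_cons_self ..) hwf
    have ihr := ih (fun tbl a ha hw => h tbl a (List.mem_cons_of_mem _ ha) hw) (body tbl b) hb.1
    refine ⟨ihr.1, fun x hx => ?_⟩
    simp only [List.foldl_cons, List.map_cons, List.sum_cons]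
    rw [ihr.2 x hx, hb.2 x hx]
    ring

-- ----- evaluation of A's pieces -----

theorem initDP_evalT (p M : Int) (gp tw : List Int) (hp : 0 < p) :
    WFt p M (initDP p M gp tw) ∧ ∀ x, InRt p M x →
      lookupA (initDP p M gp tw) x
        = ((PySem.List.pyRange 0 (M + 1) 1).map
            (fun b => if x = (PySem.Int.mod (geti gp 0 * geti tw b) p, b) then (1 : Int) else 0)).sum := by
  unfold initDP
  have H : ∀ tbl (b : Int), b ∈ PySem.List.pyRange 0 (M + 1) 1 → WFt p M tbl →
      WFt p M (bumpT tbl (PySem.Int.mod (geti gp 0 * geti tw b) p, b) 1) ∧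
      ∀ x, InRt p M x →
        lookupA (bumpT tbl (PySem.Int.mod (geti gp 0 * geti tw b) p, b) 1) x
          = lookupA tbl x + (if x = (PySem.Int.mod (geti gp 0 * geti tw b) p, b) then (1 : Int) else 0) := by
    intro tbl b hb hwf
    have hb' := (PySem.List.mem_pyRange_one).1 hb
    exact bumpT_eval p M hp tbl _ 1 hwf
      ⟨PySem.Int.mod_nonneg _ hp, PySem.Int.mod_lt _ hp, by omega, by omega⟩
  have main := foldl_addT p M
    (fun b x => if x = (PySem.Int.mod (geti gp 0 * geti tw b) p, b) then (1 : Int) else 0)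
    _ (PySem.List.pyRange 0 (M + 1) 1) H (zerosT p M) (zerosT_wf p M)
  exact ⟨main.1, fun x hx => by rw [main.2 x hx, zerosT_get p M hp x hx, zero_add]⟩

theorem stepA_evalT_mid (p M k : Int) (tw : List Int) (coeff j : Int)
    (dp : List (List Int)) (hp : 0 < p) (hj : ¬ j = k - 1) :
    WFt p M (stepA p M k tw coeff j dp) ∧ ∀ x, InRt p M x →
      lookupA (stepA p M k tw coeff j dp) x
        = ((PySem.List.pyRange 0 p 1).map (fun r' =>
            ((PySem.List.pyRange 0 (M + 1) 1).map (fun bp =>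
              ((PySem.List.pyRange bp (M + 1) 1).map (fun bn =>
                if x = (PySem.Int.mod (r' + coeff * geti tw bn) p, bn)
                then lookupA dp (r', bp) else 0)).sum)).sum)).sum := by
  unfold stepA
  have H2 : ∀ (r : Int), ∀ nd (bp : Int), bp ∈ PySem.List.pyRange 0 (M + 1) 1 → WFt p M nd →
      WFt p M (if lookupA dp (r, bp) = 0 then nd
        else if j = k - 1 then
          (if M ≥ bp then bumpT nd (PySem.Int.mod (r + coeff * geti tw M) p, M) (lookupA dp (r, bp)) else nd)
        else (PySem.List.pyRange bp (M + 1) 1).foldl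
          (fun nd b_new => bumpT nd (PySem.Int.mod (r + coeff * geti tw b_new) p, b_new)
            (lookupA dp (r, bp))) nd) ∧
      ∀ x, InRt p M x →
        lookupA (if lookupA dp (r, bp) = 0 then nd
          else if j = k - 1 then
            (if M ≥ bp then bumpT nd (PySem.Int.mod (r + coeff * geti tw M) p, M) (lookupA dp (r, bp)) else nd)
          else (PySem.List.pyRange bp (M + 1) 1).foldl
            (fun nd b_new => bumpT nd (PySem.Int.mod (r + coeff * geti tw b_new) p, b_new)
              (lookupA dp (r, bp))) nd) x
          = lookupA nd x + ((PySem.List.pyRange bp (M + 1) 1).map (fun bn =>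
              if x = (PySem.Int.mod (r + coeff * geti tw bn) p, bn)
              then lookupA dp (r, bp) else 0)).sum := by
    intro r nd bp hbp hwf
    have hbp' := (PySem.List.mem_pyRange_one).1 hbp
    by_cases hz : lookupA dp (r, bp) = 0
    · simp only [if_pos hz]
      exact ⟨hwf, fun x hx => by simp [hz]⟩
    · simp only [if_neg hz, if_neg hj]
      have H3 : ∀ nd (bn : Int), bn ∈ PySem.List.pyRange bp (M + 1) 1 → WFt p M nd →
          WFt p M (bumpT nd (PySem.Int.mod (r + coeff * geti tw bn) p, bn) (lookupA dp (r, bp))) ∧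
          ∀ x, InRt p M x →
            lookupA (bumpT nd (PySem.Int.mod (r + coeff * geti tw bn) p, bn) (lookupA dp (r, bp))) x
              = lookupA nd x + (if x = (PySem.Int.mod (r + coeff * geti tw bn) p, bn)
                  then lookupA dp (r, bp) else 0) := by
        intro nd bn hbn hwf3
        have hbn' := (PySem.List.mem_pyRange_one).1 hbn
        exact bumpT_eval p M hp nd _ _ hwf3
          ⟨PySem.Int.mod_nonneg _ hp, PySem.Int.mod_lt _ hp, by omega, by omega⟩
      exact foldl_addT p M
        (fun bn x => if x = (PySem.Int.mod (r + coeff * geti tw bn) p, bn)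
          then lookupA dp (r, bp) else 0)
        _ (PySem.List.pyRange bp (M + 1) 1) H3 nd hwf
  have main := foldl_addT p M
    (fun r' x => ((PySem.List.pyRange 0 (M + 1) 1).map (fun bp =>
        ((PySem.List.pyRange bp (M + 1) 1).map (fun bn =>
          if x = (PySem.Int.mod (r' + coeff * geti tw bn) p, bn)
          then lookupA dp (r', bp) else 0)).sum)).sum)
    _ (PySem.List.pyRange 0 p 1)
    (fun nd r _ hwf => foldl_addT p M
      (fun bp x => ((PySem.List.pyRange bp (M + 1) 1).map (fun bn =>
          if x = (PySem.Int.mod (r + coeff * geti tw bn) p, bn)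
          then lookupA dp (r, bp) else 0)).sum)
      _ (PySem.List.pyRange 0 (M + 1) 1) (H2 r) nd hwf)
    (zerosT p M) (zerosT_wf p M)
  exact ⟨main.1, fun x hx => by rw [main.2 x hx, zerosT_get p M hp x hx, zero_add]⟩

theorem stepA_evalT_last (p M k : Int) (tw : List Int) (coeff j : Int)
    (dp : List (List Int)) (hp : 0 < p) (hM : 0 ≤ M) (hj : j = k - 1) :
    WFt p M (stepA p M k tw coeff j dp) ∧ ∀ x, InRt p M x →
      lookupA (stepA p M k tw coeff j dp) x
        = ((PySem.List.pyRange 0 p 1).map (fun r' =>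
            ((PySem.List.pyRange 0 (M + 1) 1).map (fun bp =>
              if x = (PySem.Int.mod (r' + coeff * geti tw M) p, M)
              then lookupA dp (r', bp) else 0)).sum)).sum := by
  unfold stepA
  have H2 : ∀ (r : Int), ∀ nd (bp : Int), bp ∈ PySem.List.pyRange 0 (M + 1) 1 → WFt p M nd →
      WFt p M (if lookupA dp (r, bp) = 0 then nd
        else if j = k - 1 then
          (if M ≥ bp then bumpT nd (PySem.Int.mod (r + coeff * geti tw M) p, M) (lookupA dp (r, bp)) else nd)
        else (PySem.List.pyRange bp (M + 1) 1).foldl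
          (fun nd b_new => bumpT nd (PySem.Int.mod (r + coeff * geti tw b_new) p, b_new)
            (lookupA dp (r, bp))) nd) ∧
      ∀ x, InRt p M x →
        lookupA (if lookupA dp (r, bp) = 0 then nd
          else if j = k - 1 then
            (if M ≥ bp then bumpT nd (PySem.Int.mod (r + coeff * geti tw M) p, M) (lookupA dp (r, bp)) else nd)
          else (PySem.List.pyRange bp (M + 1) 1).foldl
            (fun nd b_new => bumpT nd (PySem.Int.mod (r + coeff * geti tw b_new) p, b_new)
              (lookupA dp (r, bp))) nd) x
          = lookupA nd x + (if x = (PySem.Int.mod (r + coeff * geti tw M) p, M)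
              then lookupA dp (r, bp) else 0) := by
    intro r nd bp hbp hwf
    have hbp' := (PySem.List.mem_pyRange_one).1 hbp
    by_cases hz : lookupA dp (r, bp) = 0
    · simp only [if_pos hz]
      exact ⟨hwf, fun x hx => by simp [hz]⟩
    · simp only [if_neg hz, if_pos hj, if_pos (show M ≥ bp by omega)]
      exact bumpT_eval p M hp nd _ _ hwf
        ⟨PySem.Int.mod_nonneg _ hp, PySem.Int.mod_lt _ hp, by omega, le_rfl⟩
  have main := foldl_addT p M
    (fun r' x => ((PySem.List.pyRange 0 (M + 1) 1).map (fun bp =>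
        if x = (PySem.Int.mod (r' + coeff * geti tw M) p, M)
        then lookupA dp (r', bp) else 0)).sum)
    _ (PySem.List.pyRange 0 p 1)
    (fun nd r _ hwf => foldl_addT p M
      (fun bp x => if x = (PySem.Int.mod (r + coeff * geti tw M) p, M)
        then lookupA dp (r, bp) else 0)
      _ (PySem.List.pyRange 0 (M + 1) 1) (H2 r) nd hwf)
    (zerosT p M) (zerosT_wf p M)
  exact ⟨main.1, fun x hx => by rw [main.2 x hx, zerosT_get p M hp x hx, zero_add]⟩

-- collapse of A's triple sum at one in-range cell (middle step)
theorem collapse_mid (p M coeff : Int) (twf : Int → Int) (hp : 0 < p)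
    (r b : Int) (hr0 : 0 ≤ r) (hrp : r < p) (hb0 : 0 ≤ b) (hbM : b ≤ M)
    (dp : Int × Int → Int) :
    ((PySem.List.pyRange 0 p 1).map (fun r' =>
        ((PySem.List.pyRange 0 (M + 1) 1).map (fun bp =>
          ((PySem.List.pyRange bp (M + 1) 1).map (fun bn =>
            if (r, b) = (PySem.Int.mod (r' + coeff * twf bn) p, bn) then dp (r', bp) else 0)).sum)).sum)).sum
      = ((PySem.List.pyRange 0 (b + 1) 1).map
          (fun bp => dp (PySem.Int.mod (r - coeff * twf b) p, bp))).sum := by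
  set r0 := PySem.Int.mod (r - coeff * twf b) p with hr0def
  have hr0mem : 0 ≤ r0 ∧ r0 < p := ⟨PySem.Int.mod_nonneg _ hp, PySem.Int.mod_lt _ hp⟩
  have houter : ∀ r' ∈ PySem.List.pyRange 0 p 1,
      ((PySem.List.pyRange 0 (M + 1) 1).map (fun bp =>
        ((PySem.List.pyRange bp (M + 1) 1).map (fun bn =>
          if (r, b) = (PySem.Int.mod (r' + coeff * twf bn) p, bn) then dp (r', bp) else 0)).sum)).sum
      = if r0 = r' then ((PySem.List.pyRange 0 (b + 1) 1).map (fun bp => dp (r', bp))).sum else 0 := by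
    intro r' hr'
    have hr'b := (PySem.List.mem_pyRange_one).1 hr'
    have hinner : ∀ bp ∈ PySem.List.pyRange 0 (M + 1) 1,
        ((PySem.List.pyRange bp (M + 1) 1).map (fun bn =>
          if (r, b) = (PySem.Int.mod (r' + coeff * twf bn) p, bn) then dp (r', bp) else 0)).sum
        = if r0 = r' then (if bp ≤ b then dp (r', bp) else 0) else 0 := by
      intro bp hbp
      have hbpb := (PySem.List.mem_pyRange_one).1 hbp
      have hterm : ∀ bn ∈ PySem.List.pyRange bp (M + 1) 1,
          (if (r, b) = (PySem.Int.mod (r' + coeff * twf bn) p, bn) then dp (r', bp) else 0)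
          = (if b = bn then (if r = PySem.Int.mod (r' + coeff * twf bn) p then dp (r', bp) else 0) else 0) := by
        intro bn _
        by_cases hbbn : b = bn
        · subst hbbn; simp [Prod.ext_iff]
        · simp [Prod.ext_iff, hbbn]
      rw [List.map_congr_left hterm,
        sum_pick _ _ (PySem.List.pairwise_lt_pyRange_one _ _) b]
      have hmem : b ∈ PySem.List.pyRange bp (M + 1) 1 ↔ bp ≤ b := by
        rw [PySem.List.mem_pyRange_one]; omega
      by_cases hle : bp ≤ b
      · rw [if_pos (hmem.2 hle), if_pos hle]
        have heq : (r = PySem.Int.mod (r' + coeff * twf b) p) ↔ (r0 = r') := by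
          rw [shift_unique p r r' (coeff * twf b) hp hr0 hrp (by omega) (by omega), ← hr0def, eq_comm]
        simp only [heq]
      · rw [if_neg (fun h => hle (hmem.1 h))]
        simp [hle]
    rw [List.map_congr_left hinner, ite_sum_pull, prefix_split M b hb0 hbM]
  rw [List.map_congr_left houter,
    sum_pick _ _ (PySem.List.pairwise_lt_pyRange_one _ _) r0,
    if_pos ((PySem.List.mem_pyRange_one).2 ⟨hr0mem.1, hr0mem.2⟩)]

-- collapse of A's double sum at one in-range cell (last step)
theorem collapse_last (p M coeff : Int) (twM : Int) (hp : 0 < p)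
    (r b : Int) (hr0 : 0 ≤ r) (hrp : r < p)
    (dp : Int × Int → Int) :
    ((PySem.List.pyRange 0 p 1).map (fun r' =>
        ((PySem.List.pyRange 0 (M + 1) 1).map (fun bp =>
          if (r, b) = (PySem.Int.mod (r' + coeff * twM) p, M) then dp (r', bp) else 0)).sum)).sum
      = if b = M then
          ((PySem.List.pyRange 0 (M + 1) 1).map
            (fun bp => dp (PySem.Int.mod (r - coeff * twM) p, bp))).sum
        else 0 := by
  set r0 := PySem.Int.mod (r - coeff * twM) p with hr0def
  have hr0mem : 0 ≤ r0 ∧ r0 < p := ⟨PySem.Int.mod_nonneg _ hp, PySem.Int.mod_lt _ hp⟩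
  by_cases hbM : b = M
  · subst hbM
    have houter : ∀ r' ∈ PySem.List.pyRange 0 p 1,
        ((PySem.List.pyRange 0 (b + 1) 1).map (fun bp =>
          if (r, b) = (PySem.Int.mod (r' + coeff * twM) p, b) then dp (r', bp) else 0)).sum
        = if r0 = r' then ((PySem.List.pyRange 0 (b + 1) 1).map (fun bp => dp (r', bp))).sum else 0 := by
      intro r' hr'
      have hr'b := (PySem.List.mem_pyRange_one).1 hr'
      have : ((r, b) = (PySem.Int.mod (r' + coeff * twM) p, b)) ↔ (r0 = r') := by
        rw [Prod.ext_iff]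
        simp only [and_true]
        rw [shift_unique p r r' (coeff * twM) hp hr0 hrp (by omega) (by omega), ← hr0def, eq_comm]
      simp only [this]
      rw [ite_sum_pull]
    rw [List.map_congr_left houter, if_pos rfl,
      sum_pick _ _ (PySem.List.pairwise_lt_pyRange_one _ _) r0,
      if_pos ((PySem.List.mem_pyRange_one).2 ⟨hr0mem.1, hr0mem.2⟩)]
  · rw [if_neg hbM]
    have houter : ∀ r' ∈ PySem.List.pyRange 0 p 1,
        ((PySem.List.pyRange 0 (M + 1) 1).map (fun bp =>
          if (r, b) = (PySem.Int.mod (r' + coeff * twM) p, M) then dp (r', bp) else 0)).sum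
        = 0 := by
      intro r' _
      have : ∀ bp ∈ PySem.List.pyRange 0 (M + 1) 1,
          (if (r, b) = (PySem.Int.mod (r' + coeff * twM) p, M) then dp (r', bp) else 0) = 0 := by
        intro bp _
        simp [Prod.ext_iff, hbM]
      rw [List.map_congr_left this]
      simp
    rw [List.map_congr_left houter]
    simp

-- ----- B's vector primitives -----

theorem zerosRow_eq (p : Int) : zerosRow p = List.replicate p.toNat 0 := by
  unfold zerosRow
  exact PySem.List.pyRepeat_singleton _ _

theorem length_zerosRow (p : Int) : (zerosRow p).length = p.toNat := by
  rw [zerosRow_eq]; simp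

theorem get_zerosRow (p r : Int) (h0 : 0 ≤ r) (h1 : r < p) :
    PySem.List.pyGetD (zerosRow p) r 0 = 0 := by
  rw [zerosRow_eq]
  rw [PySem.List.pyGetD_eq_getElem _ _ h0 (by simp; omega)]
  simp

theorem length_vadd (xs ys : List Int) : (vadd xs ys).length = min xs.length ys.length := by
  unfold vadd; simp

theorem get_vadd (xs ys : List Int) (r : Int) (h0 : 0 ≤ r)
    (h1 : r < xs.length) (h2 : r < ys.length) :
    PySem.List.pyGetD (vadd xs ys) r 0
      = PySem.List.pyGetD xs r 0 + PySem.List.pyGetD ys r 0 := by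
  rw [PySem.List.pyGetD_eq_getElem _ _ h0 (by rw [length_vadd]; omega),
    PySem.List.pyGetD_eq_getElem _ _ h0 h1, PySem.List.pyGetD_eq_getElem _ _ h0 h2]
  unfold vadd
  simp

theorem rot_eq (p s : Int) (xs : List Int) (hs : 0 ≤ s) (hsp : s ≤ p) :
    rot p s xs = xs.drop (p - s).toNat ++ xs.take (p - s).toNat := by
  unfold rot
  rw [PySem.List.slice_from _ (by omega), PySem.List.slice_to _ (by omega)]

theorem length_rot (p s : Int) (xs : List Int) (hs : 0 ≤ s) (hsp : s ≤ p)
    (hlen : xs.length = p.toNat) : (rot p s xs).length = p.toNat := by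
  rw [rot_eq p s xs hs hsp]
  simp [hlen]
  omega

theorem rot_get (p s : Int) (xs : List Int) (hp : 0 < p) (hs : 0 ≤ s) (hsp : s < p)
    (hlen : xs.length = p.toNat) (r : Int) (h0 : 0 ≤ r) (h1 : r < p) :
    PySem.List.pyGetD (rot p s xs) r 0
      = PySem.List.pyGetD xs (PySem.Int.mod (r - s) p) 0 := by
  rw [rot_eq p s xs hs (by omega)]
  have hdl : (xs.drop (p - s).toNat).length = s.toNat := by simp [hlen]; omega
  have htl : (xs.take (p - s).toNat).length = (p - s).toNat := by simp [hlen]; omega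
  rw [PySem.List.pyGetD_eq_getElem _ _ h0 (by simp [hdl, htl]; omega)]
  by_cases hrs : r < s
  · have hmod : PySem.Int.mod (r - s) p = r - s + p := by
      have h : (r - s) % p = (r - s + p) % p := by
        rw [show r - s + p = (r - s) + p * 1 by ring, Int.add_mul_emod_self_left]
      rw [PySem.Int.mod_eq_emod_of_pos hp, h, Int.emod_eq_of_lt (by omega) (by omega)]
    rw [hmod, PySem.List.pyGetD_eq_getElem _ _ (by omega) (by rw [hlen]; omega)]
    rw [List.getElem_append_left (by rw [hdl]; omega)]
    rw [List.getElem_drop]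
    congr 1
    omega
  · have hmod : PySem.Int.mod (r - s) p = r - s := by
      rw [PySem.Int.mod_eq_emod_of_pos hp, Int.emod_eq_of_lt (by omega) (by omega)]
    rw [hmod, PySem.List.pyGetD_eq_getElem _ _ (by omega) (by rw [hlen]; omega)]
    rw [List.getElem_append_right (by rw [hdl]; omega)]
    rw [List.getElem_take]
    congr 1
    rw [hdl]
    omega

theorem foldl_vadd_len (N : Nat) :
    ∀ (l : List (List Int)) (acc : List Int), acc.length = N → (∀ c ∈ l, c.length = N) →
      (l.foldl vadd acc).length = N := by
  intro l
  induction l with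
  | nil => intro acc ha _; simpa using ha
  | cons c cs ih =>
    intro acc ha hl
    simp only [List.foldl_cons]
    apply ih
    · rw [length_vadd, ha, hl c (List.mem_cons_self ..)]; omega
    · intro c' hc'; exact hl c' (List.mem_cons_of_mem _ hc')

theorem foldl_vadd_get (p : Int) (hp : 0 < p) (r : Int) (h0 : 0 ≤ r) (h1 : r < p) :
    ∀ (l : List (List Int)) (acc : List Int), acc.length = p.toNat →
      (∀ c ∈ l, c.length = p.toNat) →
      PySem.List.pyGetD (l.foldl vadd acc) r 0
        = PySem.List.pyGetD acc r 0 + (l.map (fun c => PySem.List.pyGetD c r 0)).sum := by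
  intro l
  induction l with
  | nil => intro acc _ _; simp
  | cons c cs ih =>
    intro acc ha hl
    have hc : c.length = p.toNat := hl c (List.mem_cons_self ..)
    simp only [List.foldl_cons, List.map_cons, List.sum_cons]
    rw [ih (vadd acc c) (by rw [length_vadd, ha, hc]; omega)
      (fun c' hc' => hl c' (List.mem_cons_of_mem _ hc')),
      get_vadd acc c r h0 (by rw [ha]; omega) (by rw [hc]; omega)]
    ring

theorem sum_map_take (cols : List (List Int)) (f : List Int → Int) (n : Nat)
    (hn : n ≤ cols.length) :
    ((cols.take n).map f).sum
      = ((PySem.List.pyRange 0 (n : Int) 1).map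
          (fun i => f (PySem.List.pyGetD cols i []))).sum := by
  have hlen : (cols.take n).length = n := by simp; omega
  have h1 := PySem.List.map_pyGetD_pyRange_zero' (cols.take n) ([] : List Int)
  rw [hlen] at h1
  calc ((cols.take n).map f).sum
      = (((PySem.List.pyRange 0 (n : Int) 1).map
          (fun j => PySem.List.pyGetD (cols.take n) j [])).map f).sum := by rw [h1]
    _ = ((PySem.List.pyRange 0 (n : Int) 1).map
          (fun i => f (PySem.List.pyGetD cols i []))).sum := by
        rw [List.map_map]
        apply congrArg
        apply List.map_congr_left
        intro i hi
        have hib := (PySem.List.mem_pyRange_one).1 hi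
        simp only [Function.comp]
        congr 1
        rw [PySem.List.pyGetD_eq_getElem _ _ (by omega) (by rw [hlen]; omega),
          PySem.List.pyGetD_eq_getElem _ _ (by omega) (by push_cast; omega)]
        exact List.getElem_take

-- ----- B's init and steps, closed forms -----

theorem initFold (p : Int) :
    ∀ (L : List Int) (out : List (List Int)) (pw : Int),
      ((L.foldl (fun (st : List (List Int) × Int) _ =>
        (st.1 ++ [PySem.List.pySetD (zerosRow p) st.2 1], PySem.Int.mod (2 * st.2) p))
        (out, pw))).1 = out ++ iRec p L.length pw := by
  intro L
  induction L with
  | nil => intro out pw; simp [iRec]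
  | cons a L ih =>
    intro out pw
    simp only [List.foldl_cons, List.length_cons]
    rw [ih]
    simp [iRec]

theorem initColsB_eq (p M : Int) :
    initColsB p M = iRec p (M + 1).toNat (PySem.Int.mod 1 p) := by
  unfold initColsB
  rw [initFold, PySem.List.length_pyRange_one]
  simp

theorem length_iRec (p : Int) : ∀ (n : Nat) (pw : Int), (iRec p n pw).length = n := by
  intro n
  induction n with
  | zero => intro pw; simp [iRec]
  | succ m ih => intro pw; simp [iRec, ih]

theorem entries_iRec (p : Int) : ∀ (n : Nat) (pw : Int), ∀ c ∈ iRec p n pw, c.length = p.toNat := by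
  intro n
  induction n with
  | zero => intro pw c hc; simp [iRec] at hc
  | succ m ih =>
    intro pw c hc
    simp only [iRec, List.mem_cons] at hc
    rcases hc with h | h
    · subst h; rw [PySem.List.length_pySetD, length_zerosRow]
    · exact ih _ c h

theorem iRec_get (p : Int) (hp : 0 < p) :
    ∀ (n b : Nat) (pw : Int), b < n → 0 ≤ pw → pw < p →
      ∀ r : Int, 0 ≤ r → r < p →
        PySem.List.pyGetD (PySem.List.pyGetD (iRec p n pw) (b : Int) []) r 0
          = if r = PySem.Int.mod (2 ^ b * pw) p then 1 else 0 := by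
  intro n
  induction n with
  | zero => intro b pw hb; omega
  | succ m ih =>
    intro b pw hb hpw0 hpwp r hr0 hr1
    match b with
    | 0 =>
      simp only [iRec, Int.natCast_zero, PySem.List.pyGetD_zero_cons]
      rw [PySem.List.pySetD_of_nonneg _ _ hpw0]
      rw [PySem.List.pyGetD_eq_getElem _ _ hr0 (by simp [length_zerosRow]; omega)]
      rw [List.getElem_set, pow_zero, one_mul, mod_small p pw hpw0 hpwp]
      by_cases hc : r = pw
      · simp [hc]
      · rw [if_neg (by omega), if_neg hc]
        simp [zerosRow_eq]
    | b + 1 =>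
      have hcast : ((b + 1 : Nat) : Int) = (b : Int) + 1 := by push_cast; ring
      simp only [iRec, hcast]
      have : PySem.List.pyGetD (PySem.List.pySetD (zerosRow p) pw 1 :: iRec p m (PySem.Int.mod (2 * pw) p)) ((b : Int) + 1) []
          = PySem.List.pyGetD (iRec p m (PySem.Int.mod (2 * pw) p)) (b : Int) [] := by
        rw [show ((b : Int) + 1) = ((b + 1 : Nat) : Int) by push_cast; ring]
        rw [PySem.List.pyGetD_natCast, PySem.List.pyGetD_natCast]
        simp
      rw [this, ih b _ (by omega) (PySem.Int.mod_nonneg _ hp) (PySem.Int.mod_lt _ hp) r hr0 hr1]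
      rw [mod_mul_mod_right p _ _ hp]
      congr 2
      ring

theorem midFold (p coeff : Int) :
    ∀ (cs : List (List Int)) (out : List (List Int)) (acc : List Int) (pw : Int),
      ((cs.foldl (fun (st : List (List Int) × List Int × Int) col =>
        (st.1 ++ [rot p (PySem.Int.mod (coeff * st.2.2) p) (vadd st.2.1 col)], vadd st.2.1 col,
         PySem.Int.mod (2 * st.2.2) p)) (out, acc, pw))).1
      = out ++ midRec p coeff cs acc pw := by
  intro cs
  induction cs with
  | nil => intro out acc pw; simp [midRec]
  | cons c cs ih =>
    intro out acc pw
    simp only [List.foldl_cons]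
    rw [ih]
    simp [midRec]

theorem stepMidB_eq (p coeff : Int) (cols : List (List Int)) :
    stepMidB p coeff cols = midRec p coeff cols (zerosRow p) (PySem.Int.mod 1 p) := by
  unfold stepMidB
  rw [midFold]
  simp

theorem length_midRec (p coeff : Int) :
    ∀ (cs : List (List Int)) (acc : List Int) (pw : Int),
      (midRec p coeff cs acc pw).length = cs.length := by
  intro cs
  induction cs with
  | nil => intro acc pw; simp [midRec]
  | cons c cs ih => intro acc pw; simp [midRec, ih]

theorem entries_midRec (p coeff : Int) (hp : 0 < p) :
    ∀ (cs : List (List Int)) (acc : List Int) (pw : Int), acc.length = p.toNat →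
      (∀ c ∈ cs, c.length = p.toNat) →
      ∀ c ∈ midRec p coeff cs acc pw, c.length = p.toNat := by
  intro cs
  induction cs with
  | nil => intro acc pw _ _ c hc; simp [midRec] at hc
  | cons c0 cs ih =>
    intro acc pw ha hl c hc
    have hc0 : c0.length = p.toNat := hl c0 (List.mem_cons_self ..)
    simp only [midRec, List.mem_cons] at hc
    rcases hc with h | h
    · subst h
      apply length_rot p _ _ (PySem.Int.mod_nonneg _ hp) (le_of_lt (PySem.Int.mod_lt _ hp))
      rw [length_vadd, ha, hc0]; omega
    · exact ih (vadd acc c0) _ (by rw [length_vadd, ha, hc0]; omega)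
        (fun c' hc' => hl c' (List.mem_cons_of_mem _ hc')) c h

theorem midRec_get (p coeff : Int) (hp : 0 < p) :
    ∀ (cs : List (List Int)) (acc : List Int) (pw : Int) (b : Nat),
      b < cs.length → acc.length = p.toNat → (∀ c ∈ cs, c.length = p.toNat) →
      0 ≤ pw → pw < p →
      ∀ r : Int, 0 ≤ r → r < p →
        PySem.List.pyGetD (PySem.List.pyGetD (midRec p coeff cs acc pw) (b : Int) []) r 0
          = PySem.List.pyGetD ((cs.take (b + 1)).foldl vadd acc)
              (PySem.Int.mod (r - coeff * (2 ^ b * pw)) p) 0 := by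
  intro cs
  induction cs with
  | nil => intro acc pw b hb; simp at hb
  | cons c0 cs ih =>
    intro acc pw b hb ha hl hpw0 hpwp r hr0 hr1
    have hc0 : c0.length = p.toNat := hl c0 (List.mem_cons_self ..)
    have hacc' : (vadd acc c0).length = p.toNat := by rw [length_vadd, ha, hc0]; omega
    match b with
    | 0 =>
      simp only [midRec, Int.natCast_zero, PySem.List.pyGetD_zero_cons, List.take_succ_cons,
        List.take_zero, List.foldl_cons, List.foldl_nil]
      rw [rot_get p _ _ hp (PySem.Int.mod_nonneg _ hp) (PySem.Int.mod_lt _ hp) hacc' r hr0 hr1]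
      rw [mod_sub_mod p _ _ hp]
      rw [pow_zero, one_mul]
    | b + 1 =>
      have hcast : ((b + 1 : Nat) : Int) = (b : Int) + 1 := by push_cast; ring
      simp only [midRec]
      have hidx : PySem.List.pyGetD (rot p (PySem.Int.mod (coeff * pw) p) (vadd acc c0) ::
            midRec p coeff cs (vadd acc c0) (PySem.Int.mod (2 * pw) p)) ((b + 1 : Nat) : Int) []
          = PySem.List.pyGetD (midRec p coeff cs (vadd acc c0) (PySem.Int.mod (2 * pw) p)) (b : Int) [] := by
        rw [PySem.List.pyGetD_natCast, PySem.List.pyGetD_natCast]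
        simp
      rw [hidx, ih (vadd acc c0) _ b (by simp at hb; omega) hacc'
        (fun c' hc' => hl c' (List.mem_cons_of_mem _ hc'))
        (PySem.Int.mod_nonneg _ hp) (PySem.Int.mod_lt _ hp) r hr0 hr1]
      have harg : PySem.Int.mod (r - coeff * (2 ^ b * PySem.Int.mod (2 * pw) p)) p
          = PySem.Int.mod (r - coeff * (2 ^ (b + 1) * pw)) p := by
        rw [show coeff * (2 ^ b * PySem.Int.mod (2 * pw) p) = (coeff * 2 ^ b) * PySem.Int.mod (2 * pw) p by ring,
          mod_sub_mul_mod p _ _ _ hp]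
        congr 1
        ring
      rw [harg]
      simp [List.take_succ_cons]

-- ----- power-list lookups -----

theorem tw_spec (p M b : Int) (h0 : 0 ≤ b) (h1 : b ≤ M) :
    geti ((PySem.List.pyRange 0 (M + 1) 1).map (fun b => PySem.Int.powMod 2 b.toNat p)) b
      = PySem.Int.mod (2 ^ b.toNat) p := by
  unfold geti
  rw [PySem.List.pyGetD_map_pyRange_of_nonneg _ _ _ _ h0 (by omega)]
  rfl

theorem gp_spec (p k g j : Int) (h0 : 0 ≤ j) (h1 : j < k) :
    geti ((PySem.List.pyRange 0 k 1).map (fun j => PySem.Int.powMod g j.toNat p)) j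
      = PySem.Int.mod (g ^ j.toNat) p := by
  unfold geti
  rw [PySem.List.pyGetD_map_pyRange_of_nonneg _ _ _ _ h0 h1]
  rfl

theorem mod_idem (p x : Int) (hp : 0 < p) :
    PySem.Int.mod (PySem.Int.mod x p) p = PySem.Int.mod x p := by
  have := mod_mul_mod_right p 1 x hp
  simpa using this

-- ----- the two step lemmas: one B step simulates one A step -----

theorem step_mid (p M k coeff j : Int) (hp : 0 < p) (hM : 0 ≤ M) (hj : ¬ j = k - 1)
    (cols : List (List Int)) (dp : List (List Int))
    (hOK : OKc p M cols)
    (hag : ∀ r b : Int, 0 ≤ r → r < p → 0 ≤ b → b ≤ M → Fc cols (r, b) = lookupA dp (r, b)) :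
    OKc p M (stepMidB p coeff cols) ∧
    ∀ r b : Int, 0 ≤ r → r < p → 0 ≤ b → b ≤ M →
      Fc (stepMidB p coeff cols) (r, b)
        = lookupA (stepA p M k
            ((PySem.List.pyRange 0 (M + 1) 1).map (fun b => PySem.Int.powMod 2 b.toNat p))
            coeff j dp) (r, b) := by
  obtain ⟨hlen, hent⟩ := hOK
  have hm1 : 0 ≤ PySem.Int.mod 1 p ∧ PySem.Int.mod 1 p < p :=
    ⟨PySem.Int.mod_nonneg _ hp, PySem.Int.mod_lt _ hp⟩
  constructor
  · rw [stepMidB_eq]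
    exact ⟨by rw [length_midRec]; exact hlen,
      entries_midRec p coeff hp cols _ _ (length_zerosRow p) hent⟩
  intro r b hr0 hrp hb0 hbM
  rw [(stepA_evalT_mid p M k
      ((PySem.List.pyRange 0 (M + 1) 1).map (fun b => PySem.Int.powMod 2 b.toNat p))
      coeff j dp hp hj).2 (r, b) ⟨hr0, hrp, hb0, hbM⟩,
    collapse_mid p M coeff
      (fun bn => geti ((PySem.List.pyRange 0 (M + 1) 1).map (fun b => PySem.Int.powMod 2 b.toNat p)) bn)
      hp r b hr0 hrp hb0 hbM (lookupA dp)]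
  show PySem.List.pyGetD (PySem.List.pyGetD (stepMidB p coeff cols) b []) r 0 = _
  rw [stepMidB_eq]
  have hblt : b.toNat < cols.length := by rw [hlen]; omega
  have hmr := midRec_get p coeff hp cols (zerosRow p) (PySem.Int.mod 1 p) b.toNat hblt
    (length_zerosRow p) hent hm1.1 hm1.2 r hr0 hrp
  rw [show ((b.toNat : Nat) : Int) = b by omega] at hmr
  rw [hmr]
  have hidx : PySem.Int.mod (r - coeff * (2 ^ b.toNat * PySem.Int.mod 1 p)) p
      = PySem.Int.mod (r - coeff *
          geti ((PySem.List.pyRange 0 (M + 1) 1).map (fun b => PySem.Int.powMod 2 b.toNat p)) b) p := by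
    rw [tw_spec p M b hb0 hbM,
      show coeff * (2 ^ b.toNat * PySem.Int.mod 1 p) = (coeff * 2 ^ b.toNat) * PySem.Int.mod 1 p by ring,
      mod_sub_mul_mod p _ _ _ hp, mul_one, mod_sub_mul_mod p _ _ _ hp]
  rw [hidx]
  set r0 := PySem.Int.mod (r - coeff *
    geti ((PySem.List.pyRange 0 (M + 1) 1).map (fun b => PySem.Int.powMod 2 b.toNat p)) b) p with hr0def
  have hr0b : 0 ≤ r0 ∧ r0 < p := ⟨PySem.Int.mod_nonneg _ hp, PySem.Int.mod_lt _ hp⟩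
  rw [foldl_vadd_get p hp r0 hr0b.1 hr0b.2 (cols.take (b.toNat + 1)) (zerosRow p)
    (length_zerosRow p) (fun c hc => hent c (List.mem_of_mem_take hc)),
    get_zerosRow p r0 hr0b.1 hr0b.2, zero_add,
    sum_map_take cols _ (b.toNat + 1) (by omega),
    show (((b.toNat + 1 : Nat)) : Int) = b + 1 by omega]
  apply congrArg
  apply List.map_congr_left
  intro bp hbp
  have hbpb := (PySem.List.mem_pyRange_one).1 hbp
  exact hag r0 bp hr0b.1 hr0b.2 (by omega) (by omega)

theorem step_last (p M k coeff j : Int) (hp : 0 < p) (hM : 0 ≤ M) (hj : j = k - 1)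
    (cols : List (List Int)) (dp : List (List Int))
    (hOK : OKc p M cols)
    (hag : ∀ r b : Int, 0 ≤ r → r < p → 0 ≤ b → b ≤ M → Fc cols (r, b) = lookupA dp (r, b)) :
    OKc p M (stepLastB p M coeff cols) ∧
    ∀ r b : Int, 0 ≤ r → r < p → 0 ≤ b → b ≤ M →
      Fc (stepLastB p M coeff cols) (r, b)
        = lookupA (stepA p M k
            ((PySem.List.pyRange 0 (M + 1) 1).map (fun b => PySem.Int.powMod 2 b.toNat p))
            coeff j dp) (r, b) := by
  obtain ⟨hlen, hent⟩ := hOK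
  set s := PySem.Int.mod (coeff * PySem.Int.powMod 2 M.toNat p) p with hsdef
  have hsb : 0 ≤ s ∧ s < p := ⟨PySem.Int.mod_nonneg _ hp, PySem.Int.mod_lt _ hp⟩
  have htot : (cols.foldl vadd (zerosRow p)).length = p.toNat :=
    foldl_vadd_len p.toNat cols (zerosRow p) (length_zerosRow p) hent
  have hrep : PySem.List.pyRepeat [zerosRow p] M = List.replicate M.toNat (zerosRow p) :=
    PySem.List.pyRepeat_singleton _ _
  have hOK' : OKc p M (stepLastB p M coeff cols) := by
    unfold stepLastB
    constructor
    · rw [List.length_append, hrep]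
      simp
      omega
    · intro c hc
      rw [List.mem_append, hrep] at hc
      rcases hc with hc | hc
      · rw [List.eq_of_mem_replicate hc, length_zerosRow]
      · rw [List.mem_singleton] at hc
        subst hc
        exact length_rot p s _ hsb.1 (by omega) htot
  refine ⟨hOK', ?_⟩
  intro r b hr0 hrp hb0 hbM
  rw [(stepA_evalT_last p M k
      ((PySem.List.pyRange 0 (M + 1) 1).map (fun b => PySem.Int.powMod 2 b.toNat p))
      coeff j dp hp hM hj).2 (r, b) ⟨hr0, hrp, hb0, hbM⟩,
    collapse_last p M coeff
      (geti ((PySem.List.pyRange 0 (M + 1) 1).map (fun b => PySem.Int.powMod 2 b.toNat p)) M)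
      hp r b hr0 hrp (lookupA dp)]
  show PySem.List.pyGetD (PySem.List.pyGetD (stepLastB p M coeff cols) b []) r 0 = _
  unfold stepLastB
  rw [hrep]
  have houter : PySem.List.pyGetD (List.replicate M.toNat (zerosRow p) ++
      [rot p s (cols.foldl vadd (zerosRow p))]) b []
      = (List.replicate M.toNat (zerosRow p) ++ [rot p s (cols.foldl vadd (zerosRow p))])[b.toNat]'
          (by simp; omega) := by
    exact PySem.List.pyGetD_eq_getElem _ _ hb0 (by simp; omega)
  rw [houter]
  by_cases hbm : b = M
  · rw [List.getElem_append_right (by simp; omega)]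
    rw [List.getElem_singleton]
    rw [if_pos hbm]
    rw [rot_get p s _ hp hsb.1 hsb.2 htot r hr0 hrp]
    have hidx : PySem.Int.mod (r - s) p
        = PySem.Int.mod (r - coeff *
            geti ((PySem.List.pyRange 0 (M + 1) 1).map (fun b => PySem.Int.powMod 2 b.toNat p)) M) p := by
      rw [hsdef, mod_sub_mod p _ _ hp,
        show PySem.Int.powMod 2 M.toNat p = PySem.Int.mod (2 ^ M.toNat) p from rfl,
        mod_sub_mul_mod p _ _ _ hp, tw_spec p M M (by omega) le_rfl,
        mod_sub_mul_mod p _ _ _ hp]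
    rw [hidx]
    set r0 := PySem.Int.mod (r - coeff *
      geti ((PySem.List.pyRange 0 (M + 1) 1).map (fun b => PySem.Int.powMod 2 b.toNat p)) M) p with hr0def
    have hr0b : 0 ≤ r0 ∧ r0 < p := ⟨PySem.Int.mod_nonneg _ hp, PySem.Int.mod_lt _ hp⟩
    rw [foldl_vadd_get p hp r0 hr0b.1 hr0b.2 cols (zerosRow p) (length_zerosRow p) hent,
      get_zerosRow p r0 hr0b.1 hr0b.2, zero_add]
    conv_lhs => rw [← List.take_length (l := cols)]
    rw [sum_map_take cols _ cols.length le_rfl, hlen,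
      show ((((M + 1).toNat : Nat)) : Int) = M + 1 by omega]
    apply congrArg
    apply List.map_congr_left
    intro bp hbp
    have hbpb := (PySem.List.mem_pyRange_one).1 hbp
    exact hag r0 bp hr0b.1 hr0b.2 (by omega) (by omega)
  · rw [if_neg hbm]
    rw [List.getElem_append_left (by simp; omega)]
    rw [List.getElem_replicate]
    exact get_zerosRow p r hr0 hrp

-- ----- init agreement -----

theorem init_OK (p M : Int) (hM : 0 ≤ M) : OKc p M (initColsB p M) := by
  rw [initColsB_eq]
  exact ⟨length_iRec p _ _, entries_iRec p _ _⟩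

theorem init_agree (p M k g : Int) (hp : 0 < p) (hk : 1 ≤ k) :
    ∀ r b : Int, 0 ≤ r → r < p → 0 ≤ b → b ≤ M →
      Fc (initColsB p M) (r, b)
        = lookupA (initDP p M ((PySem.List.pyRange 0 k 1).map (fun j => PySem.Int.powMod g j.toNat p))
            ((PySem.List.pyRange 0 (M + 1) 1).map (fun b => PySem.Int.powMod 2 b.toNat p))) (r, b) := by
  intro r b hr0 hrp hb0 hbM
  have hm1 : 0 ≤ PySem.Int.mod 1 p ∧ PySem.Int.mod 1 p < p :=
    ⟨PySem.Int.mod_nonneg _ hp, PySem.Int.mod_lt _ hp⟩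
  rw [(initDP_evalT p M
      ((PySem.List.pyRange 0 k 1).map (fun j => PySem.Int.powMod g j.toNat p))
      ((PySem.List.pyRange 0 (M + 1) 1).map (fun b => PySem.Int.powMod 2 b.toNat p))
      hp).2 (r, b) ⟨hr0, hrp, hb0, hbM⟩]
  have hterm : ∀ b' ∈ PySem.List.pyRange 0 (M + 1) 1,
      (if (r, b) = (PySem.Int.mod
          (geti ((PySem.List.pyRange 0 k 1).map (fun j => PySem.Int.powMod g j.toNat p)) 0 *
           geti ((PySem.List.pyRange 0 (M + 1) 1).map (fun b => PySem.Int.powMod 2 b.toNat p)) b') p, b')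
        then (1 : Int) else 0)
      = (if b = b' then (if r = PySem.Int.mod
          (geti ((PySem.List.pyRange 0 k 1).map (fun j => PySem.Int.powMod g j.toNat p)) 0 *
           geti ((PySem.List.pyRange 0 (M + 1) 1).map (fun b => PySem.Int.powMod 2 b.toNat p)) b') p
          then (1 : Int) else 0) else 0) := by
    intro b' _
    by_cases hbb : b = b'
    · subst hbb; simp [Prod.ext_iff]
    · simp [Prod.ext_iff, hbb]
  rw [List.map_congr_left hterm,
    sum_pick _ _ (PySem.List.pairwise_lt_pyRange_one _ _) b,
    if_pos ((PySem.List.mem_pyRange_one).2 ⟨hb0, by omega⟩)]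
  have hkey : PySem.Int.mod
      (geti ((PySem.List.pyRange 0 k 1).map (fun j => PySem.Int.powMod g j.toNat p)) 0 *
       geti ((PySem.List.pyRange 0 (M + 1) 1).map (fun b => PySem.Int.powMod 2 b.toNat p)) b) p
      = PySem.Int.mod (2 ^ b.toNat) p := by
    rw [gp_spec p k g 0 le_rfl (by omega), tw_spec p M b hb0 hbM]
    show PySem.Int.mod (PySem.Int.mod (g ^ (0 : Int).toNat) p * PySem.Int.mod (2 ^ b.toNat) p) p = _
    rw [show ((0 : Int)).toNat = 0 by rfl, pow_zero,
      mod_mul_mod_left p _ _ hp, one_mul, mod_idem p _ hp]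
  rw [hkey]
  show PySem.List.pyGetD (PySem.List.pyGetD (initColsB p M) b []) r 0 = _
  rw [initColsB_eq]
  have hig := iRec_get p hp (M + 1).toNat b.toNat (PySem.Int.mod 1 p) (by omega) hm1.1 hm1.2 r hr0 hrp
  rw [show ((b.toNat : Nat) : Int) = b by omega] at hig
  rw [hig, mod_mul_mod_right p _ _ hp, mul_one]

-- ----- readout agreement -----

theorem readout_eq (p M : Int) (hp : 0 < p) (hM : 0 ≤ M)
    (cols : List (List Int)) (dp : List (List Int)) (hOK : OKc p M cols)
    (hag : ∀ r b : Int, 0 ≤ r → r < p → 0 ≤ b → b ≤ M → Fc cols (r, b) = lookupA dp (r, b)) :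
    readoutB p cols = readout p M dp := by
  unfold readoutB readout
  have hfold : (PySem.List.pyRange 0 p 1).foldl
      (fun (acc : PySem.Dict Int Int × Int) a =>
        let cnt := (cols.map (fun col => PySem.List.pyGetD col a 0)).sum
        ((if 0 < cnt then acc.1.insert a cnt else acc.1), acc.2 + cnt))
      ((PySem.Dict.empty : PySem.Dict Int Int), 0)
      = (PySem.List.pyRange 0 p 1).foldl
      (fun (acc : PySem.Dict Int Int × Int) a =>
        let count := ((PySem.List.pyRange 0 (M + 1) 1).map (fun b => lookupA dp (a, b))).sum
        ((if 0 < count then acc.1.insert a count else acc.1), acc.2 + count))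
      ((PySem.Dict.empty : PySem.Dict Int Int), 0) := by
    apply PySem.List.foldl_congr_mem
    intro acc a ha
    have hab := (PySem.List.mem_pyRange_one).1 ha
    have hcnt : (cols.map (fun col => PySem.List.pyGetD col a 0)).sum
        = ((PySem.List.pyRange 0 (M + 1) 1).map (fun b => lookupA dp (a, b))).sum := by
      conv_lhs => rw [← List.take_length (l := cols)]
      rw [sum_map_take cols _ cols.length le_rfl, hOK.1,
        show ((((M + 1).toNat : Nat)) : Int) = M + 1 by omega]
      apply congrArg
      apply List.map_congr_left
      intro b hb
      have hbb := (PySem.List.mem_pyRange_one).1 hb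
      exact hag a b (by omega) (by omega) (by omega) (by omega)
    simp only [hcnt]
  rw [hfold]

-- ----- where compute_g returns None (Pre_'s k = 0 cases, and negative p) -----

theorem modinvLoop_nonpos (fuel : Nat) :
    ∀ (a r s t m : Int), a ≤ 0 → r ≤ 0 → modinvLoop fuel a r s t m = none := by
  induction fuel with
  | zero => intro a r s t m _ _; rfl
  | succ n ih =>
    intro a r s t m ha hr
    simp only [modinvLoop]
    by_cases h : r = 0
    · rw [if_pos h, if_neg (by omega)]
    · rw [if_neg h]
      apply ih
      · exact hr
      · have hq := PySem.Int.floordiv_mul_add_mod a r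
        have hb := (PySem.Int.mod_neg_bounds a (show r < 0 by omega)).2
        omega

theorem modinv_neg (p : Int) (hp : p < 0) : modinv 3 p = none := by
  unfold modinv
  rw [if_neg (by omega)]
  exact modinvLoop_nonpos _ _ _ _ _ _ (PySem.Int.mod_neg_bounds 3 hp).2 (by omega)

theorem modinvLoop_dvd3 (fuel : Nat) :
    ∀ (a r s t m : Int), 3 ∣ a → 3 ∣ r → modinvLoop fuel a r s t m = none := by
  induction fuel with
  | zero => intro a r s t m _ _; rfl
  | succ n ih =>
    intro a r s t m ha hr
    simp only [modinvLoop]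
    by_cases h : r = 0
    · rw [if_pos h, if_neg (by omega)]
    · rw [if_neg h]
      exact ih _ _ _ _ _ hr (dvd_sub ha (hr.mul_left _))

theorem modinv_dvd3 (p : Int) (h3 : (3 : Int) ∣ p) : modinv 3 p = none := by
  unfold modinv
  rw [if_neg (by omega)]
  apply modinvLoop_dvd3
  · have hq := PySem.Int.floordiv_mul_add_mod 3 p
    have hmeq : PySem.Int.mod 3 p = 3 - PySem.Int.floordiv 3 p * p := by omega
    rw [hmeq]
    exact dvd_sub (by norm_num) (h3.mul_left _)
  · exact h3

-- max_B = S - k ≥ 1 for k ≥ 1 (since 3^k ≥ 2^k)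
theorem M_pos (k : Int) (hk : 1 ≤ k) : 1 ≤ compute_S k - k := by
  unfold compute_S
  have h1 : k.toNat ≤ Nat.log2 (3 ^ k.toNat) := by
    rw [Nat.le_log2 (by positivity)]
    exact Nat.pow_le_pow_left (by norm_num) _
  omega

-- ----- the j-loop simulation -----

-- A's fold state (the dp table) after processing j' = 1 .. j-1
def dpAfter (p M k g : Int) (j : Int) : List (List Int) :=
  (PySem.List.pyRange 1 j 1).foldl
    (fun dp j' => stepA p M k
      ((PySem.List.pyRange 0 (M + 1) 1).map (fun b => PySem.Int.powMod 2 b.toNat p))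
      (geti ((PySem.List.pyRange 0 k 1).map (fun j => PySem.Int.powMod g j.toNat p)) j') j' dp)
    (initDP p M ((PySem.List.pyRange 0 k 1).map (fun j => PySem.Int.powMod g j.toNat p))
      ((PySem.List.pyRange 0 (M + 1) 1).map (fun b => PySem.Int.powMod 2 b.toNat p)))

-- B's fold state after processing j' = 1 .. j-1
def stAfter (p M k g : Int) (j : Int) : List (List Int) × Int :=
  (PySem.List.pyRange 1 j 1).foldl
    (fun (st : List (List Int) × Int) j =>
      let coeff := PySem.Int.mod (st.2 * g) p
      ((if j = k - 1 then stepLastB p M coeff st.1 else stepMidB p coeff st.1), coeff))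
    (initColsB p M, PySem.Int.mod 1 p)

theorem sim (p M k g : Int) (hp : 0 < p) (hk : 1 ≤ k) (hM : 0 ≤ M) :
    ∀ n : Nat, 1 + (n : Int) ≤ k →
      OKc p M (stAfter p M k g (1 + (n : Int))).1 ∧
      (stAfter p M k g (1 + (n : Int))).2 = PySem.Int.mod (g ^ n) p ∧
      ∀ r b : Int, 0 ≤ r → r < p → 0 ≤ b → b ≤ M →
        Fc (stAfter p M k g (1 + (n : Int))).1 (r, b) = lookupA (dpAfter p M k g (1 + (n : Int))) (r, b) := by
  intro n
  induction n with
  | zero =>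
    intro _
    have hnil : PySem.List.pyRange 1 (1 + ((0 : Nat) : Int)) 1 = [] := by
      apply PySem.List.pyRange_one_eq_nil
      simp
    unfold stAfter dpAfter
    rw [hnil]
    simp only [List.foldl_nil]
    exact ⟨init_OK p M hM, by simp, init_agree p M k g hp hk⟩
  | succ n ih =>
    intro h
    have hle : 1 + (n : Int) ≤ k := by push_cast at h ⊢; omega
    obtain ⟨ihOK, ihc, ihag⟩ := ih hle
    have hsplit : PySem.List.pyRange 1 (1 + ((n + 1 : Nat) : Int)) 1
        = PySem.List.pyRange 1 (1 + (n : Int)) 1 ++ [1 + (n : Int)] := by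
      push_cast
      rw [show (1 : Int) + ((n : Int) + 1) = (1 + (n : Int)) + 1 by ring]
      exact PySem.List.pyRange_one_succ_right (by omega)
    have hstB : stAfter p M k g (1 + ((n + 1 : Nat) : Int))
        = (let coeff := PySem.Int.mod ((stAfter p M k g (1 + (n : Int))).2 * g) p
           ((if (1 + (n : Int)) = k - 1
             then stepLastB p M coeff (stAfter p M k g (1 + (n : Int))).1
             else stepMidB p coeff (stAfter p M k g (1 + (n : Int))).1), coeff)) := by
      unfold stAfter
      rw [hsplit, List.foldl_append]
      simp only [List.foldl_cons, List.foldl_nil]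
    have hstA : dpAfter p M k g (1 + ((n + 1 : Nat) : Int))
        = stepA p M k
            ((PySem.List.pyRange 0 (M + 1) 1).map (fun b => PySem.Int.powMod 2 b.toNat p))
            (geti ((PySem.List.pyRange 0 k 1).map (fun j => PySem.Int.powMod g j.toNat p)) (1 + (n : Int)))
            (1 + (n : Int)) (dpAfter p M k g (1 + (n : Int))) := by
      unfold dpAfter
      rw [hsplit, List.foldl_append]
      simp only [List.foldl_cons, List.foldl_nil]
    have hcoB : PySem.Int.mod ((stAfter p M k g (1 + (n : Int))).2 * g) p
        = PySem.Int.mod (g ^ (n + 1)) p := by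
      rw [ihc, mod_mul_mod_left p _ _ hp, ← pow_succ]
    have hcoA : geti ((PySem.List.pyRange 0 k 1).map (fun j => PySem.Int.powMod g j.toNat p)) (1 + (n : Int))
        = PySem.Int.mod (g ^ (n + 1)) p := by
      rw [gp_spec p k g (1 + (n : Int)) (by omega) (by omega)]
      rw [show ((1 + (n : Int))).toNat = n + 1 by omega]
    by_cases hjk : (1 + (n : Int)) = k - 1
    · have hstep := step_last p M k (PySem.Int.mod (g ^ (n + 1)) p) (1 + (n : Int)) hp hM hjk
        (stAfter p M k g (1 + (n : Int))).1 (dpAfter p M k g (1 + (n : Int))) ihOK ihag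
      rw [hstB, hstA]
      simp only [hcoB, hcoA, if_pos hjk]
      exact ⟨hstep.1, by trivial, hstep.2⟩
    · have hstep := step_mid p M k (PySem.Int.mod (g ^ (n + 1)) p) (1 + (n : Int)) hp hM hjk
        (stAfter p M k g (1 + (n : Int))).1 (dpAfter p M k g (1 + (n : Int))) ihOK ihag
      rw [hstB, hstA]
      simp only [hcoB, hcoA, if_neg hjk]
      exact ⟨hstep.1, by trivial, hstep.2⟩

-- ===== VERDICT (by name: the statement is the Claim_ definition above) =====
theorem compute_all_Z_dp_spec : Claim_equal_compute_all_Z_dp := by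
  intro k p hdom hpre
  unfold Spec_compute_all_Z_dp
  obtain ⟨hp0, hk'⟩ := hpre
  show compute_all_Z_dp k p = compute_all_Z_dp_alt k p
  unfold compute_all_Z_dp compute_all_Z_dp_alt
  cases hg : compute_g p with
  | none => simp only [hg]
  | some g =>
    simp only [hg]
    have hppos : 0 < p := by
      rcases lt_trichotomy p 0 with h | h | h
      · exfalso
        have hnone := modinv_neg p h
        unfold compute_g at hg
        rw [hnone] at hg
        simp at hg
      · omega
      · exact h
    have hk : 1 ≤ k := by
      rcases hk' with h | ⟨hk0, hcase⟩
      · exact h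
      · exfalso
        rcases hcase with h | h
        · have hnone := modinv_neg p h
          unfold compute_g at hg
          rw [hnone] at hg
          simp at hg
        · have h3 : (3 : Int) ∣ p := (PySem.Int.mod_eq_zero_iff_dvd p 3).1 h
          have hnone := modinv_dvd3 p h3
          unfold compute_g at hg
          rw [hnone] at hg
          simp at hg
    have hM : 1 ≤ compute_S k - k := M_pos k hk
    have hsim := sim p (compute_S k - k) k g hppos hk (by omega) (k - 1).toNat (by omega)
    rw [show (1 + (((k - 1).toNat : Nat) : Int)) = k by omega] at hsim
    obtain ⟨hOK, _, hag⟩ := hsim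
    show readout p (compute_S k - k) (dpAfter p (compute_S k - k) k g k)
      = readoutB p (stAfter p (compute_S k - k) k g k).1
    exact (readout_eq p (compute_S k - k) hppos (by omega)
      (stAfter p (compute_S k - k) k g k).1 (dpAfter p (compute_S k - k) k g k) hOK hag).symm
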